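-- pv_equiv track=rewrite | github.com/byggstyrning/pyByggstyrning.extension | pyBS.tab/dev.panel/tools.stack/SelectBranch.pushbutton/script.py | _classify_branch
-- ===== SOURCE A (Python) =====
-- _BRANCH_TYPE_RULES = [
--     ('feature/', ('FEATURE', '#2196F3')),
--     ('feat/',    ('FEATURE', '#2196F3')),
--     ('fix/',     ('FIX',     '#66BB6A')),
--     ('bugfix/',  ('FIX',     '#66BB6A')),
--     ('hotfix/',  ('HOTFIX',  '#EF5350')),
--     ('release/', ('RELEASE', '#AB47BC')),
--     ('chore/',   ('CHORE',   '#90A4AE')),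
--     ('docs/',    ('DOCS',    '#78909C')),
--     ('refactor/', ('REFACTOR', '#FFA726')),
--     ('experiment/', ('EXPERIMENT', '#26C6DA')),
--     ('test/',    ('TEST',    '#BDBDBD')),
-- ]
--
-- _DEFAULT_TYPE = ('OTHER', '#9E9E9E')
--
-- _MAIN_TYPE = ('MAIN', '#ffbb00')
--
-- _MAIN_NAMES = {'master', 'main', 'develop', 'dev', 'trunk'}
--
-- def _classify_branch(name):
--     """Return (type_label, type_color_hex) for a branch name."""
--     lower = name.lower()
--     if lower in _MAIN_NAMES:
--         return _MAIN_TYPE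
--     for prefix, info in _BRANCH_TYPE_RULES:
--         if lower.startswith(prefix):
--             return info
--     return _DEFAULT_TYPE
-- ===== SOURCE B (Python) =====
-- _STEM_LABEL = {
--     'feature': 'FEATURE', 'feat': 'FEATURE',
--     'fix': 'FIX', 'bugfix': 'FIX',
--     'hotfix': 'HOTFIX', 'release': 'RELEASE',
--     'chore': 'CHORE', 'docs': 'DOCS',
--     'refactor': 'REFACTOR', 'experiment': 'EXPERIMENT',
--     'test': 'TEST',
-- }
--
-- _LABEL_COLOR = {
--     'FEATURE': '#2196F3', 'FIX': '#66BB6A', 'HOTFIX': '#EF5350',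
--     'RELEASE': '#AB47BC', 'CHORE': '#90A4AE', 'DOCS': '#78909C',
--     'REFACTOR': '#FFA726', 'EXPERIMENT': '#26C6DA', 'TEST': '#BDBDBD',
--     'OTHER': '#9E9E9E', 'MAIN': '#ffbb00',
-- }
--
-- _MAIN_NAMES = {'master', 'main', 'develop', 'dev', 'trunk'}
--
-- def _classify_branch(name):
--     """Return (type_label, type_color_hex) for a branch name."""
--     lower = name.lower()
--     idx = lower.find('/')
--     if idx >= 0:
--         label = _STEM_LABEL.get(lower[:idx], 'OTHER')
--     elif lower in _MAIN_NAMES: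
--         label = 'MAIN'
--     else:
--         label = 'OTHER'
--     return (label, _LABEL_COLOR[label])
-- ===== Notes on version B (the rewrite author's own statement) =====
-- stated objective: idiomatic
-- what changed: Replaces the linear scan over (prefix, info) rules with startswith by a two-stage table lookup: extract the segment before the first '/' once, map it through a stem-to-label dict, then map the label through a label-to-color dict; the main-names check moves into the slash-less branch.
import Mathlib
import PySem

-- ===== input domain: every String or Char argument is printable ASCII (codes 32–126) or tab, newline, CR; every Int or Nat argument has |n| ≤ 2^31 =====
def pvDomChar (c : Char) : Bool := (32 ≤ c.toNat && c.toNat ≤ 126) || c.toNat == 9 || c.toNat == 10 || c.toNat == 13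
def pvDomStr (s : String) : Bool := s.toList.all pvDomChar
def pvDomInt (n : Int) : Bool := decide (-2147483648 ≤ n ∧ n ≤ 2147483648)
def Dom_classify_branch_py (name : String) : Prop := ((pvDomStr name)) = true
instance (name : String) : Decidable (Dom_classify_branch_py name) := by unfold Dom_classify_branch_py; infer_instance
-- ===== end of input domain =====

-- B replaces A's startswith scan over (prefix, info) rules by a two-stage table lookup:
-- the segment before the first '/' is mapped to a label, the label to a color (idiomatic).

def pvMainNames : PySem.Set String := PySem.Set.ofList ["master", "main", "develop", "dev", "trunk"]

-- ===== PORT A =====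
def pvDefaultType : String × String := ("OTHER", "#9E9E9E")
def pvMainType : String × String := ("MAIN", "#ffbb00")

def pvBranchTypeRules : List (String × (String × String)) :=
  [("feature/", ("FEATURE", "#2196F3")),
   ("feat/",    ("FEATURE", "#2196F3")),
   ("fix/",     ("FIX",     "#66BB6A")),
   ("bugfix/",  ("FIX",     "#66BB6A")),
   ("hotfix/",  ("HOTFIX",  "#EF5350")),
   ("release/", ("RELEASE", "#AB47BC")),
   ("chore/",   ("CHORE",   "#90A4AE")),
   ("docs/",    ("DOCS",    "#78909C")),
   ("refactor/", ("REFACTOR", "#FFA726")),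
   ("experiment/", ("EXPERIMENT", "#26C6DA")),
   ("test/",    ("TEST",    "#BDBDBD"))]

-- the 'for prefix, info in _BRANCH_TYPE_RULES' loop with its early returns
def pvRuleLoop (lower : String) : List (String × (String × String)) → String × String
  | [] => pvDefaultType
  | (pfx, info) :: rest =>
      if PySem.Str.startswith lower pfx then info else pvRuleLoop lower rest

def classify_branch_py (name : String) : String × String :=
  let lower := PySem.Str.lower name
  if lower ∈ pvMainNames then pvMainType
  else pvRuleLoop lower pvBranchTypeRules

-- ===== PORT B =====
def pvStemLabel : PySem.Dict String String :=
  PySem.Dict.mk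
    [("feature", "FEATURE"), ("feat", "FEATURE"),
     ("fix", "FIX"), ("bugfix", "FIX"),
     ("hotfix", "HOTFIX"), ("release", "RELEASE"),
     ("chore", "CHORE"), ("docs", "DOCS"),
     ("refactor", "REFACTOR"), ("experiment", "EXPERIMENT"),
     ("test", "TEST")]

def pvLabelColor : PySem.Dict String String :=
  PySem.Dict.mk
    [("FEATURE", "#2196F3"), ("FIX", "#66BB6A"), ("HOTFIX", "#EF5350"),
     ("RELEASE", "#AB47BC"), ("CHORE", "#90A4AE"), ("DOCS", "#78909C"),
     ("REFACTOR", "#FFA726"), ("EXPERIMENT", "#26C6DA"), ("TEST", "#BDBDBD"),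
     ("OTHER", "#9E9E9E"), ("MAIN", "#ffbb00")]

def classify_branch_py_alt (name : String) : String × String :=
  let lower := PySem.Str.lower name
  let idx := PySem.Str.find lower "/"
  let label :=
    if idx ≥ 0 then
      pvStemLabel.getD (PySem.Str.slice lower none (some idx)) "OTHER"
    else if lower ∈ pvMainNames then "MAIN"
    else "OTHER"
  -- Python's _LABEL_COLOR[label]: label is always a key of the table, so getD is exact here
  (label, pvLabelColor.getD label "")

-- ===== PRECONDITION & SPEC =====
def Spec_classify_branch_py (name : String) (out : String × String) : Prop := out = classify_branch_py_alt name
instance (name : String) (out : String × String) : Decidable (Spec_classify_branch_py name out) := by unfold Spec_classify_branch_py; infer_instance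

-- ===== CLAIM (what is proved, stated in full; the proofs are below) =====
def Claim_equal_classify_branch_py : Prop := ∀ (name : String), Dom_classify_branch_py name → Spec_classify_branch_py name (classify_branch_py name)

-- ===== LEMMAS AND PROOFS =====

-- A's rule keys are exactly B's stems with a trailing '/'
def pvStems : List (String × (String × String)) :=
  [("feature", ("FEATURE", "#2196F3")),
   ("feat",    ("FEATURE", "#2196F3")),
   ("fix",     ("FIX",     "#66BB6A")),
   ("bugfix",  ("FIX",     "#66BB6A")),
   ("hotfix",  ("HOTFIX",  "#EF5350")),
   ("release", ("RELEASE", "#AB47BC")),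
   ("chore",   ("CHORE",   "#90A4AE")),
   ("docs",    ("DOCS",    "#78909C")),
   ("refactor", ("REFACTOR", "#FFA726")),
   ("experiment", ("EXPERIMENT", "#26C6DA")),
   ("test",    ("TEST",    "#BDBDBD"))]

lemma singleton_prefix_iff {a : Char} {m : List Char} : [a] <+: m ↔ m[0]? = some a := by
  cases m with
  | nil => simp
  | cons b t => simp [List.cons_prefix_cons, eq_comm]

lemma singleton_prefix_drop_iff {a : Char} {L : List Char} {i : ℕ} :
    [a] <+: L.drop i ↔ L[i]? = some a := by
  rw [singleton_prefix_iff, List.getElem?_drop]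
  simp

lemma startswith_iff_key {L p : List Char} {k : ℕ}
    (hk : L[k]? = some '/') (hmin : ∀ i < k, L[i]? ≠ some '/')
    (hp₁ : p ≠ []) (hp₂ : p[p.length - 1]? = some '/')
    (hp₃ : ∀ i < p.length - 1, p[i]? ≠ some '/') :
    p <+: L ↔ L.take (k + 1) = p := by
  have hklen : k < L.length := by
    by_contra h
    simp [List.getElem?_eq_none (by omega : L.length ≤ k)] at hk
  have hn : 1 ≤ p.length := by
    cases p with
    | nil => exact absurd rfl hp₁
    | cons a t => simp
  constructor
  · intro hpre
    have htake : p = L.take p.length := List.prefix_iff_eq_take.mp hpre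
    have hget : ∀ i < p.length, p[i]? = L[i]? := by
      intro i hi
      rw [htake]
      rw [List.getElem?_take_of_lt hi]
    have hkn : k = p.length - 1 := by
      by_contra hne
      rcases Nat.lt_or_ge k (p.length - 1) with hlt | hge
      · exact hp₃ k hlt (by rw [← hget k (by omega)] at hk; exact hk)
      · have : p.length - 1 < k := by omega
        exact hmin _ this (by rw [← hget (p.length - 1) (by omega)]; exact hp₂)
    rw [hkn]
    have : p.length - 1 + 1 = p.length := by omega
    rw [this, ← htake]
  · intro htake
    have hlen : (L.take (k + 1)).length = k + 1 := by
      simp [List.length_take]; omega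
    have hplen : p.length = k + 1 := by rw [← htake, hlen]
    rw [← htake, hplen] at *
    exact List.take_prefix _ _

-- startswith by 'stem ++ "/"' is equality of the first segment with the stem
lemma startswith_stem_iff (s : String) (k : ℕ)
    (hk : s.toList[k]? = some '/') (hmin : ∀ i < k, s.toList[i]? ≠ some '/')
    (st : String) (hst : ('/' : Char) ∉ st.toList) :
    PySem.Str.startswith s (st ++ "/") = true ↔ s.toList.take k = st.toList := by
  rw [PySem.Str.startswith_eq, PySem.Chars.startswith_iff]
  have hpl : (st ++ ("/" : String)).toList = st.toList ++ ['/'] := by simp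
  have hlen : (st ++ ("/" : String)).toList.length = st.toList.length + 1 := by
    rw [hpl]; simp
  have h1 := startswith_iff_key (p := (st ++ "/").toList) hk hmin
    (by rw [hpl]; simp)
    (by rw [hpl]; simp)
    (by
      intro i hi
      rw [hpl]
      rw [hlen] at hi
      simp only [Nat.add_sub_cancel] at hi
      rw [List.getElem?_append_left hi]
      intro hcontra
      exact hst (List.mem_of_getElem? hcontra))
  rw [h1]
  rw [List.take_add_one, hk, hpl]
  constructor
  · intro h
    have := List.append_inj' h (by simp)
    exact this.1
  · intro h
    rw [h]
    simp

lemma ruleLoop_eq_stems (s : String) (k : ℕ)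
    (hk : s.toList[k]? = some '/') (hmin : ∀ i < k, s.toList[i]? ≠ some '/')
    (stems : List (String × (String × String)))
    (hst : ∀ e ∈ stems, ('/' : Char) ∉ e.1.toList) :
    pvRuleLoop s (stems.map fun e => (e.1 ++ "/", e.2)) =
      ((PySem.Dict.mk stems).get? (PySem.Str.slice s none (some (k : Int)))).getD pvDefaultType := by
  have hkey : (PySem.Str.slice s none (some (k : Int))).toList = s.toList.take k := by
    have h2 : PySem.List.slice s.toList none (some (k : Int)) = s.toList.take k :=
      PySem.List.slice_to_natCast (xs := s.toList) (b := k)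
    simp [h2]
  induction stems with
  | nil => simp [pvRuleLoop, PySem.Dict.get?]
  | cons e rest ih =>
    obtain ⟨st, info⟩ := e
    have hnos : ('/' : Char) ∉ st.toList := hst (st, info) (by simp)
    have hiff := startswith_stem_iff s k hk hmin st hnos
    have hbeq : (st == PySem.Str.slice s none (some (k : Int))) =
        PySem.Str.startswith s (st ++ "/") := by
      by_cases hmatch : s.toList.take k = st.toList
      · have h2 : st = PySem.Str.slice s none (some (k : Int)) :=
          String.toList_inj.mp (by rw [hkey, hmatch])
        rw [← h2, hiff.mpr hmatch]
        simp
      · have h2 : PySem.Str.startswith s (st ++ "/") = false := by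
          cases hsp : PySem.Str.startswith s (st ++ "/") with
          | false => rfl
          | true => exact absurd (hiff.mp hsp) hmatch
        rw [h2, beq_eq_false_iff_ne]
        intro heq
        exact hmatch (by rw [heq, hkey])
    rw [List.map_cons, pvRuleLoop, PySem.Dict.get?_mk_cons, hbeq]
    by_cases hc : PySem.Chars.startswith s.toList (st.toList ++ ['/']) = true
    · simp [hc]
    · simp only [PySem.Str.startswith_eq, String.toList_append, hc, Bool.false_eq_true, if_false,
        show (("/" : String).toList = ['/']) from rfl]
      exact ih (fun r hr' => hst r (by simp [hr']))

lemma ruleLoop_no_slash (s : String) (h : ('/' : Char) ∉ s.toList)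
    (rules : List (String × (String × String))) (hr : ∀ r ∈ rules, ('/' : Char) ∈ r.1.toList) :
    pvRuleLoop s rules = pvDefaultType := by
  induction rules with
  | nil => rfl
  | cons r rest ih =>
    obtain ⟨p, info⟩ := r
    have hsw : PySem.Str.startswith s p = false := by
      rw [← Bool.not_eq_true, PySem.Str.startswith_eq, PySem.Chars.startswith_iff]
      intro hpre
      exact h (hpre.subset (hr (p, info) (by simp)))
    rw [pvRuleLoop, hsw]
    simp only [Bool.false_eq_true, if_false]
    exact ih (fun r hr' => hr r (by simp [hr']))

lemma get?_nil_none (x : String) : (PySem.Dict.mk ([] : List (String × (String × String)))).get? x = none := rfl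

lemma get?_nil_none' (x : String) : (PySem.Dict.mk ([] : List (String × String))).get? x = none := rfl

-- the combined rule table splits into B's two lookup stages
set_option maxHeartbeats 1000000 in
lemma stem_bridge (h : String) :
    ((PySem.Dict.mk pvStems).get? h).getD pvDefaultType =
      (pvStemLabel.getD h "OTHER",
       pvLabelColor.getD (pvStemLabel.getD h "OTHER") "") := by
  simp only [pvStems, PySem.Dict.get?_mk_cons]
  split_ifs with h1 h2 h3 h4 h5 h6 h7 h8 h9 h10 h11
  · cases eq_of_beq h1; decide
  · cases eq_of_beq h2; decide
  · cases eq_of_beq h3; decide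
  · cases eq_of_beq h4; decide
  · cases eq_of_beq h5; decide
  · cases eq_of_beq h6; decide
  · cases eq_of_beq h7; decide
  · cases eq_of_beq h8; decide
  · cases eq_of_beq h9; decide
  · cases eq_of_beq h10; decide
  · cases eq_of_beq h11; decide
  · simp only [pvStemLabel, PySem.Dict.getD, PySem.Dict.get?_mk_cons, h1, h2, h3, h4, h5, h6,
      h7, h8, h9, h10, h11, Bool.false_eq_true, if_false, get?_nil_none, get?_nil_none']
    decide

lemma main_no_slash (s : String) (h : s ∈ pvMainNames) : PySem.Str.find s "/" = -1 := by
  have he : pvMainNames = ["master", "main", "develop", "dev", "trunk"] := by decide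
  rw [he] at h
  simp only [List.mem_cons, List.not_mem_nil, or_false] at h
  rcases h with rfl | rfl | rfl | rfl | rfl <;> decide

-- the whole body, for an arbitrary lowered string
lemma classify_core (s : String) :
    (if s ∈ pvMainNames then pvMainType else pvRuleLoop s pvBranchTypeRules) =
      ((if PySem.Str.find s "/" ≥ 0 then
          pvStemLabel.getD (PySem.Str.slice s none (some (PySem.Str.find s "/"))) "OTHER"
        else if s ∈ pvMainNames then "MAIN" else "OTHER"),
       pvLabelColor.getD
        (if PySem.Str.find s "/" ≥ 0 then
          pvStemLabel.getD (PySem.Str.slice s none (some (PySem.Str.find s "/"))) "OTHER"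
        else if s ∈ pvMainNames then "MAIN" else "OTHER") "") := by
  by_cases hmem : s ∈ pvMainNames
  · have hf := main_no_slash s hmem
    rw [hf]
    simp only [hmem, if_true, show ¬((-1 : Int) ≥ 0) by decide, if_false]
    decide
  · simp only [hmem, if_false]
    by_cases hf : PySem.Str.find s "/" = -1
    · have hf' : PySem.Chars.find s.toList ['/'] = -1 := by
        rw [PySem.Str.find_eq] at hf; exact hf
      have hno : ('/' : Char) ∉ s.toList := by
        intro hmem'
        exact ((PySem.Chars.find_eq_neg_one_iff s.toList ['/']).mp hf')
          ((List.singleton_infix_iff '/' s.toList).mpr hmem')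
      rw [ruleLoop_no_slash s hno pvBranchTypeRules (by decide), hf]
      simp only [show ¬((-1 : Int) ≥ 0) by decide, if_false]
      decide
    · have hfind : PySem.Str.find s "/" = PySem.Chars.find s.toList ['/'] := by
        rw [PySem.Str.find_eq]; rfl
      have hnn : 0 ≤ PySem.Chars.find s.toList ['/'] := by
        have h1 := PySem.Chars.neg_one_le_find s.toList ['/']
        rw [hfind] at hf
        omega
      set f := PySem.Chars.find s.toList ['/'] with hfdef
      obtain ⟨hpre, hmin⟩ := PySem.Chars.find_spec (s := s.toList) (sub := ['/']) hnn
      have hk : s.toList[f.toNat]? = some '/' := singleton_prefix_drop_iff.mp hpre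
      have hmin' : ∀ i < f.toNat, s.toList[i]? ≠ some '/' := by
        intro i hi hcontra
        exact hmin i hi (singleton_prefix_drop_iff.mpr hcontra)
      have hcast : PySem.Str.find s "/" = ((f.toNat : Int)) := by
        rw [hfind]; omega
      have hrules : pvBranchTypeRules = pvStems.map fun e => (e.1 ++ "/", e.2) := by decide
      rw [hrules, ruleLoop_eq_stems s f.toNat hk hmin' pvStems (by decide), stem_bridge, hcast]
      have hge : ((f.toNat : Int)) ≥ 0 := Int.natCast_nonneg _
      rw [if_pos hge]

-- ===== VERDICT (by name: the statement is the Claim_ definition above) =====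
theorem classify_branch_py_spec : Claim_equal_classify_branch_py := by
  intro name _
  unfold Spec_classify_branch_py classify_branch_py classify_branch_py_alt
  exact classify_core (PySem.Str.lower name)
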